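-- pv_equiv track=rewrite | github.com/TrayfourYu/ndtplanner | src/speed_planner/src/data_visualization.py | supremum
-- ===== SOURCE A (Python) =====
-- def supremum(lists):
--     num = len(lists)
--     if num == 1:
--         return lists[0]
--     elif num == 0:
--         return []
--     size = len(lists[0])
--     result = []
--     for i in range(size):
--         sup = lists[0][i]
--         for j in range(1, num):
--             sup = max(sup, lists[j][i])
--         result.append(sup)
--     return result
-- ===== SOURCE B (Python) =====
-- def supremum(lists):
--     if not lists:
--         return []
--     acc = list(lists[0])
--     for row in lists[1:]:
--         for i in range(len(acc)):
--             if row[i] > acc[i]: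
--                 acc[i] = row[i]
--     return acc
-- ===== Notes on version B (the rewrite author's own statement) =====
-- stated objective: faster
-- what changed: Replaced A's column-major double loop (for each position, scan all lists by per-element index arithmetic, appending to the result) with a row-major fold over the lists updating a running element-wise-max accumulator in place.
import Mathlib
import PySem

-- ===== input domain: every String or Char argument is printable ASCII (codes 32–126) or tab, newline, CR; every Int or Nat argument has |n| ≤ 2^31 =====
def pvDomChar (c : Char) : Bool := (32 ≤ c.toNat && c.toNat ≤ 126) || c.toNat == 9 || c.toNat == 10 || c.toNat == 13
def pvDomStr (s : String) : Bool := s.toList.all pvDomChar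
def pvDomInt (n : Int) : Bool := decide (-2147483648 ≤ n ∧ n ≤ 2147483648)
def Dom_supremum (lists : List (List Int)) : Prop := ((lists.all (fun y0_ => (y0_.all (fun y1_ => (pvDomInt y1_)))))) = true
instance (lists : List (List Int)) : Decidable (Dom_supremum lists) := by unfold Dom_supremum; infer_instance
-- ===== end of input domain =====

-- B replaces A's column-major double loop by a row-major fold updating a running element-wise-max accumulator in place; same asymptotics, measured constant-factor speedup.


-- ===== PORT A =====
def supremum (lists : List (List Int)) : List Int :=
  let num : Int := lists.length
  if num = 1 then PySem.List.pyGetD lists 0 []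
  else if num = 0 then []
  else
    let size : Int := (PySem.List.pyGetD lists 0 []).length
    (PySem.List.pyRange 0 size 1).foldl (fun result i =>
      let sup := (PySem.List.pyRange 1 num 1).foldl
        (fun sup j => max sup (PySem.List.pyGetD (PySem.List.pyGetD lists j []) i 0))
        (PySem.List.pyGetD (PySem.List.pyGetD lists 0 []) i 0)
      result ++ [sup]) []

-- ===== PORT B =====
-- row[i] / acc[i] with i from range(len(acc)) are ported as pyGetD / List.set; exact since i is in range under Pre_supremum.
def supremum_alt (lists : List (List Int)) : List Int :=
  match lists with
  | [] => []
  | h :: t =>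
    t.foldl (fun acc row =>
      (List.range acc.length).foldl (fun (a : List Int) (i : Nat) =>
        if PySem.List.pyGetD row (i : Int) 0 > PySem.List.pyGetD a (i : Int) 0
        then a.set i (PySem.List.pyGetD row (i : Int) 0) else a) acc) h

-- ===== PRECONDITION & SPEC =====
-- Pre_ excludes exactly the ragged inputs on which A (and B) raise IndexError: a later list shorter than the first.
def Pre_supremum (lists : List (List Int)) : Prop :=
  ∀ l ∈ lists.tail, (lists.headD []).length ≤ l.length
instance (lists : List (List Int)) : Decidable (Pre_supremum lists) := by unfold Pre_supremum; infer_instance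
def pvWitness_supremum : List (List Int) := [[1, 5, 2], [4, 0, 3]]

def Spec_supremum (lists : List (List Int)) (out : List Int) : Prop := out = supremum_alt lists
instance (lists : List (List Int)) (out : List Int) : Decidable (Spec_supremum lists out) := by unfold Spec_supremum; infer_instance

-- ===== CLAIM (what is proved, stated in full; the proofs are below) =====
def Claim_equal_supremum : Prop := ∀ (lists : List (List Int)), Dom_supremum lists → Pre_supremum lists → Spec_supremum lists (supremum lists)

-- ===== LEMMAS AND PROOFS =====

-- B's inner index loop, after n steps, has written the element-wise max into the first n positions.
theorem fold_set_take (row a : List Int) (hr : a.length ≤ row.length) (n : Nat) (hn : n ≤ a.length) :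
    (List.range n).foldl (fun (b : List Int) (i : Nat) =>
        if PySem.List.pyGetD row (i : Int) 0 > PySem.List.pyGetD b (i : Int) 0
        then b.set i (PySem.List.pyGetD row (i : Int) 0) else b) a
      = ((a.zip row).map (fun p => max p.1 p.2)).take n ++ a.drop n := by
  induction n with
  | zero => simp
  | succ n ih =>
    have hn' : n ≤ a.length := Nat.le_of_succ_le hn
    have hna : n < a.length := hn
    have hnr : n < row.length := Nat.lt_of_lt_of_le hna hr
    have hT : ((a.zip row).map (fun p : Int × Int => max p.1 p.2)).length = a.length := by
      simp [Nat.min_eq_left hr]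
    rw [List.range_succ, List.foldl_append, ih hn']
    set T := (a.zip row).map (fun p : Int × Int => max p.1 p.2) with hTdef
    have hTn : n < T.length := by rw [hT]; exact hna
    have htlen : (T.take n).length = n := by
      simp [Nat.min_eq_left (Nat.le_of_lt hTn)]
    have hdrop : a.drop n = a[n] :: a.drop (n + 1) := List.drop_eq_getElem_cons hna
    have hgetL : (T.take n ++ a.drop n).getD n 0 = a[n] := by
      rw [List.getD_eq_getElem?_getD, List.getElem?_append_right (le_of_eq htlen), htlen,
        Nat.sub_self, hdrop]
      rfl
    have hTget : T[n] = max a[n] row[n] := by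
      simp [hTdef, List.getElem_zip]
    have hTtake : T.take (n + 1) = T.take n ++ [T[n]] := by
      rw [List.take_add_one, List.getElem?_eq_getElem hTn]; rfl
    have hrowg : row.getD n 0 = row[n] := by
      rw [List.getD_eq_getElem?_getD, List.getElem?_eq_getElem hnr]; rfl
    simp only [List.foldl_cons, List.foldl_nil, PySem.List.pyGetD_natCast]
    rw [hgetL, hrowg, hTtake, hTget]
    by_cases hcmp : row[n] > a[n]
    · rw [if_pos hcmp, List.set_append, htlen, if_neg (by omega), Nat.sub_self, hdrop,
        List.set_cons_zero, max_eq_right (le_of_lt hcmp)]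
      simp
    · rw [if_neg hcmp, max_eq_left (by omega), hdrop]
      simp

-- Full pass of B's inner loop = element-wise max by zip.
theorem inner_eq (row a : List Int) (hr : a.length ≤ row.length) :
    (List.range a.length).foldl (fun (b : List Int) (i : Nat) =>
        if PySem.List.pyGetD row (i : Int) 0 > PySem.List.pyGetD b (i : Int) 0
        then b.set i (PySem.List.pyGetD row (i : Int) 0) else b) a
      = (a.zip row).map (fun p => max p.1 p.2) := by
  rw [fold_set_take row a hr a.length (le_refl _)]
  simp [Nat.min_eq_left hr]

-- B's outer fold equals the zip-map fold under the length precondition.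
theorem alt_eq_zipfold (t : List (List Int)) (h : List Int)
    (hlen : ∀ l ∈ t, h.length ≤ l.length) :
    t.foldl (fun acc row =>
        (List.range acc.length).foldl (fun (a : List Int) (i : Nat) =>
          if PySem.List.pyGetD row (i : Int) 0 > PySem.List.pyGetD a (i : Int) 0
          then a.set i (PySem.List.pyGetD row (i : Int) 0) else a) acc) h
      = t.foldl (fun acc row => (acc.zip row).map (fun p => max p.1 p.2)) h := by
  induction t generalizing h with
  | nil => rfl
  | cons b t ih =>
    have hb : h.length ≤ b.length := hlen b (by simp)
    simp only [List.foldl_cons]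
    rw [inner_eq b h hb]
    exact ih _ (by
      intro l hl
      have : ((h.zip b).map (fun p : Int × Int => max p.1 p.2)).length = h.length := by
        simp [Nat.min_eq_left hb]
      rw [this]; exact hlen l (List.mem_cons_of_mem _ hl))

-- The zip-map fold computes, per position, the running max over the remaining lists.
theorem foldB_char (t : List (List Int)) (h : List Int)
    (hlen : ∀ l ∈ t, h.length ≤ l.length) :
    t.foldl (fun acc row => (acc.zip row).map (fun p => max p.1 p.2)) h
      = (List.range h.length).map
          (fun k => t.foldl (fun s l => max s (l.getD k 0)) (h.getD k 0)) := by
  induction t generalizing h with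
  | nil =>
    simp only [List.foldl_nil]
    apply List.ext_getElem
    · simp
    · intro i h1 h2
      simp [List.getD_eq_getElem?_getD, h1]
  | cons b t ih =>
    have hb : h.length ≤ b.length := hlen b (by simp)
    have hzl : ((h.zip b).map (fun p : Int × Int => max p.1 p.2)).length = h.length := by
      simp [Nat.min_eq_left hb]
    simp only [List.foldl_cons]
    rw [ih _ (by intro l hl; rw [hzl]; exact hlen l (List.mem_cons_of_mem _ hl))]
    rw [hzl]
    apply List.map_congr_left
    intro k hk
    have hk' : k < h.length := List.mem_range.mp hk
    congr 1
    have hkz : k < (h.zip b).length := by simp [Nat.min_eq_left hb]; exact hk'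
    rw [List.getD_eq_getElem?_getD, List.getElem?_map, List.getElem?_eq_getElem hkz]
    simp [List.getElem_zip, List.getD_eq_getElem?_getD,
      List.getElem?_eq_getElem hk', List.getElem?_eq_getElem (Nat.lt_of_lt_of_le hk' hb)]

theorem supremum_spec_aux (lists : List (List Int)) (hpre : Pre_supremum lists) :
    supremum lists = supremum_alt lists := by
  match lists with
  | [] => rfl
  | [h] => simp [supremum, supremum_alt]
  | h :: b :: t =>
    have hpre' : ∀ l ∈ b :: t, h.length ≤ l.length := by simpa [Pre_supremum] using hpre
    unfold supremum supremum_alt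
    rw [if_neg (by simp only [List.length_cons]; push_cast; omega), if_neg (by simp only [List.length_cons]; push_cast; omega)]
    simp only [PySem.List.pyGetD_zero_cons]
    rw [PySem.List.foldl_append_singleton_eq_map]
    have hinner : ∀ i : Int,
        (PySem.List.pyRange 1 ((h :: b :: t).length : Int) 1).foldl
          (fun sup j => max sup (PySem.List.pyGetD (PySem.List.pyGetD (h :: b :: t) j []) i 0))
          (PySem.List.pyGetD h i 0)
        = (b :: t).foldl (fun s l => max s (PySem.List.pyGetD l i 0))
            (PySem.List.pyGetD h i 0) := by
      intro i
      have := PySem.List.foldl_pyRange_pyGetD (xs := h :: b :: t) (a := 1) (d := [])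
        (f := fun s l => max s (PySem.List.pyGetD l i 0))
        (init := PySem.List.pyGetD h i 0) (by omega)
      simpa using this
    rw [PySem.List.pyRange_zero_nat, List.map_map, List.nil_append]
    rw [alt_eq_zipfold (b :: t) h hpre', foldB_char (b :: t) h hpre']
    apply List.map_congr_left
    intro k hk
    simp only [Function.comp]
    rw [hinner (k : Int)]
    simp [PySem.List.pyGetD_natCast]

-- ===== VERDICT (by name: the statement is the Claim_ definition above) =====
theorem supremum_spec : Claim_equal_supremum := by
  intro lists _ hpre
  exact supremum_spec_aux lists hpre
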